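-- pv_equiv track=rewrite | github.com/volcengine/verl | atropos/environments/intern_bootcamp/internbootcamp_lib/internbootcamp/bootcamp/carthurandtable/carthurandtable.py | calculate_min_energy
-- ===== SOURCE A (Python) =====
-- from collections import defaultdict
--
-- def calculate_min_energy(n, l, d):
--     leg_info = sorted(zip(l, d), key=lambda x: -x[1])
--     freq = defaultdict(int)
--     cost_map = defaultdict(list)
--
--     for li, di in zip(l, d):
--         freq[li] += 1
--         cost_map[li].append(di)
--
--     total_cost = sum(d)
--     min_energy = float('inf')
--
--     for length in freq:
--         current_cost = total_cost - sum(cost_map[length])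
--         available = freq[length] - 1
--
--         # 计算必须移除的长腿
--         longer_cost = sum(di for li, di in zip(l, d) if li > length)
--
--         # 处理需要移除的短腿
--         short_legs = sorted([di for li, di in zip(l, d) if li < length], reverse=True)
--         keep = min(available, len(short_legs))
--         current_cost -= sum(short_legs[:keep])
--
--         # 最终总能耗
--         final_cost = longer_cost + (sum(short_legs) - sum(short_legs[:keep]))
--         min_energy = min(min_energy, final_cost)
--
--     return min_energy
-- ===== SOURCE B (Python) =====
-- def _merge(a, b):
--     out = []
--     i = j = 0
--     while i < len(a) and j < len(b):
--         if a[i] <= b[j]: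
--             out.append(a[i]); i += 1
--         else:
--             out.append(b[j]); j += 1
--     out.extend(a[i:])
--     out.extend(b[j:])
--     return out
--
--
-- def calculate_min_energy(n, l, d):
--     # one sort by length, then a single sweep over the length-groups,
--     # keeping a sorted list of the costs of the strictly shorter legs
--     pairs = sorted(zip(l, d), key=lambda p: p[0])
--     total = sum(c for _, c in pairs)
--     best = None
--     shorter = []   # costs of legs strictly shorter than the current group, ascending
--     prefix = 0     # sum(shorter)
--     while pairs:
--         length = pairs[0][0]
--         k = 1
--         while k < len(pairs) and pairs[k][0] == length:
--             k += 1
--         group = [c for _, c in pairs[:k]]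
--         gsum = sum(group)
--         remove_cheap = len(shorter) - (len(group) - 1)
--         rm = sum(shorter[:remove_cheap]) if remove_cheap > 0 else 0
--         val = (total - prefix - gsum) + rm
--         if best is None or val < best:
--             best = val
--         shorter = _merge(shorter, sorted(group))
--         prefix += gsum
--         pairs = pairs[k:]
--     return best
-- ===== Notes on version B (the rewrite author's own statement) =====
-- stated objective: faster
-- what changed: Instead of re-scanning the whole leg list and re-sorting the shorter legs for every distinct length, B sorts the legs by length once and sweeps the length-groups left to right, maintaining a merge-built ascending list of shorter-leg costs and a running prefix sum, and removes the cheapest shorts from the front of that list.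
-- outside the precondition, e.g. on calculate_min_energy(0, [], []): A returns inf, B returns None
import Mathlib
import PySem

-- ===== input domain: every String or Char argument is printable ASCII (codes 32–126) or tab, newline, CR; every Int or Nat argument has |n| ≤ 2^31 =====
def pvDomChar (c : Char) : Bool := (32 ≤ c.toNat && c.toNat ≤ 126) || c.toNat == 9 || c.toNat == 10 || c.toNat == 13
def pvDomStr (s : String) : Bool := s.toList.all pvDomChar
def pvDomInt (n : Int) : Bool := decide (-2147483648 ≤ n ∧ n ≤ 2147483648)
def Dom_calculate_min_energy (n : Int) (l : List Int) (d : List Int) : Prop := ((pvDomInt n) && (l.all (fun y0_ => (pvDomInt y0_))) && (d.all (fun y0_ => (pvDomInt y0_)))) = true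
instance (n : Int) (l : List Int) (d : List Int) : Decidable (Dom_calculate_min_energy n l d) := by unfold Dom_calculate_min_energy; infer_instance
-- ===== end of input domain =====

-- B sorts the legs by length once and sweeps the length-groups with a running merge-sorted
-- shorter-cost list and prefix sums, instead of A's re-scan + re-sort per distinct length.

-- ===== PORT A =====
def calculate_min_energy (n : Int) (l : List Int) (d : List Int) : Int :=
  let pairs := l.zip d
  let _leg_info := PySem.List.sorted pairs (fun x => -x.2) false
  let freq : PySem.Dict Int Int :=
    pairs.foldl (fun fr p => fr.modify p.1 0 (· + 1)) PySem.Dict.empty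
  let cost_map : PySem.Dict Int (List Int) :=
    pairs.foldl (fun cm p => cm.modify p.1 [] (· ++ [p.2])) PySem.Dict.empty
  let total_cost := d.sum
  -- min_energy starts as float('inf'); modelled as `none`
  let res : Option Int := freq.keys.foldl (fun me length =>
    let current_cost := total_cost - (cost_map.getD length []).sum
    let available := freq.getD length 0 - 1
    let longer_cost := ((pairs.filter (fun p => decide (length < p.1))).map (·.2)).sum
    let short_legs := PySem.List.sorted
      ((pairs.filter (fun p => decide (p.1 < length))).map (·.2)) (fun x => x) true
    let keep := min available ((short_legs.length : Int))
    let removed := (PySem.List.slice short_legs none (some keep)).sum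
    let _current_cost := current_cost - removed
    let final_cost := longer_cost + (short_legs.sum - removed)
    match me with
    | none => some final_cost
    | some m => some (min m final_cost)) none
  -- Python returns float('inf') (not an int) only when zip(l, d) is empty — excluded by Pre_
  match res with
  | some v => v
  | none => 0

-- ===== PORT B =====
-- _merge: two-pointer merge of two ascending lists
def pvMerge : List Int → List Int → List Int
  | [], b => b
  | a, [] => a
  | x :: xs, y :: ys =>
    if x ≤ y then x :: pvMerge xs (y :: ys) else y :: pvMerge (x :: xs) ys

-- the while-loop of B: consume the sorted pair list group by group
def pvLoopB (total : Int) (pairs : List (Int × Int)) (shorter : List Int)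
    (pfx : Int) (best : Option Int) : Option Int :=
  match pairs with
  | [] => best
  | p :: rest =>
    let length := p.1
    let grp := p.2 :: (rest.takeWhile (fun q => q.1 == length)).map (·.2)
    let rest' := rest.dropWhile (fun q => q.1 == length)
    let gsum := grp.sum
    let removeCheap : Int := (shorter.length : Int) - ((grp.length : Int) - 1)
    let rm := if removeCheap > 0 then (PySem.List.slice shorter none (some removeCheap)).sum else 0
    let val := (total - pfx - gsum) + rm
    let best' := match best with
      | none => some val
      | some b => if val < b then some val else some b
    pvLoopB total rest' (pvMerge shorter (PySem.List.sorted grp (fun x => x) false))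
      (pfx + gsum) best'
  termination_by pairs.length
  decreasing_by
    simp only [List.length_cons]
    exact Nat.lt_succ_of_le (List.length_dropWhile_le _ _)

def calculate_min_energy_alt (n : Int) (l : List Int) (d : List Int) : Int :=
  let pairs := PySem.List.sorted (l.zip d) (fun p => p.1) false
  let total := (pairs.map (·.2)).sum
  -- Python returns None (not an int) only when zip(l, d) is empty — excluded by Pre_
  match pvLoopB total pairs [] 0 none with
  | some v => v
  | none => 0

-- ===== PRECONDITION & SPEC =====
-- Pre_ excludes exactly the inputs with l or d empty (zip(l, d) empty), on which A returns
-- float('inf') (a float, not an int) and B returns None.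
def Pre_calculate_min_energy (n : Int) (l : List Int) (d : List Int) : Prop :=
  l ≠ [] ∧ d ≠ []
instance (n : Int) (l : List Int) (d : List Int) : Decidable (Pre_calculate_min_energy n l d) := by
  unfold Pre_calculate_min_energy; infer_instance

def pvWitness_calculate_min_energy : Int × List Int × List Int := (3, [1, 2, 1], [5, 6, 7])

def Spec_calculate_min_energy (n : Int) (l : List Int) (d : List Int) (out : Int) : Prop := out = calculate_min_energy_alt n l d
instance (n : Int) (l : List Int) (d : List Int) (out : Int) : Decidable (Spec_calculate_min_energy n l d out) := by unfold Spec_calculate_min_energy; infer_instance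

-- ===== CLAIM (what is proved, stated in full; the proofs are below) =====
def Claim_equal_calculate_min_energy : Prop := ∀ (n : Int) (l : List Int) (d : List Int), Dom_calculate_min_energy n l d → Pre_calculate_min_energy n l d → Spec_calculate_min_energy n l d (calculate_min_energy n l d)

-- ===== LEMMAS AND PROOFS =====

-- the per-candidate-length cost, exactly as A computes it
def pvF (pairs : List (Int × Int)) (L : Int) : Int :=
  let longer := ((pairs.filter (fun p => decide (L < p.1))).map (·.2)).sum
  let shorts := PySem.List.sorted
    ((pairs.filter (fun p => decide (p.1 < L))).map (·.2)) (fun x => x) true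
  let keep := min ((pairs.countP (fun p => p.1 == L) : Int) - 1) ((shorts.length : Int))
  longer + (shorts.sum - (PySem.List.slice shorts none (some keep)).sum)

-- the running-min step on an Option accumulator (None = inf)
def pvStep (me : Option Int) (v : Int) : Option Int :=
  match me with
  | none => some v
  | some m => some (min m v)

theorem pvStep_comm (me : Option Int) (x y : Int) :
    pvStep (pvStep me x) y = pvStep (pvStep me y) x := by
  cases me <;> simp [pvStep, min_comm, min_assoc, min_left_comm]

theorem pvStep_eq_match (best : Option Int) (v : Int) :
    (match best with
      | none => some v
      | some b => if v < b then some v else some b) = pvStep best v := by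
  cases best with
  | none => rfl
  | some b =>
    simp only [pvStep]
    rcases lt_or_ge v b with h | h
    · rw [if_pos h, min_eq_right h.le]
    · rw [if_neg (not_lt.mpr h), min_eq_left h]

theorem foldl_pvStep_perm (F : Int → Int) {K1 K2 : List Int} (hp : K1.Perm K2) :
    ∀ b : Option Int,
      K1.foldl (fun me L => pvStep me (F L)) b = K2.foldl (fun me L => pvStep me (F L)) b := by
  induction hp with
  | nil => intro b; rfl
  | cons x _ ih => intro b; simp only [List.foldl_cons]; exact ih _
  | swap x y l => intro b; simp only [List.foldl_cons, pvStep_comm]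
  | trans _ _ ih1 ih2 => intro b; rw [ih1, ih2]

theorem pv_sum_take_drop (l : List Int) (m : Nat) : (l.take m).sum + (l.drop m).sum = l.sum := by
  conv_rhs => rw [← List.take_append_drop m l]
  rw [List.sum_append]

-- sorted descending is the reverse of sorted ascending (for plain Int values)
theorem pv_sorted_desc_eq_reverse (xs : List Int) :
    PySem.List.sorted xs (fun x => x) true = (PySem.List.sorted xs (fun x => x) false).reverse := by
  have h : (PySem.List.sorted xs (fun x => x) true).reverse
      = PySem.List.sorted xs (fun x => x) false := by
    apply PySem.List.eq_of_perm_of_pairwise_le_of_injective (fun x : Int => x) (fun a b h => h)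
    · exact ((List.reverse_perm _).trans (PySem.List.sorted_perm xs _ true)).trans
        (PySem.List.sorted_perm xs _ false).symm
    · exact List.pairwise_reverse.mpr (PySem.List.sorted_pairwise_rev xs _)
    · exact PySem.List.sorted_pairwise xs _
  rw [← h, List.reverse_reverse]

-- B's cheapest-short removal (from the ascending list) = A's total minus kept-expensive
-- (from the descending list)
theorem pv_rm_eq (xs : List Int) (c : Int) (hc : 1 ≤ c) :
    (if ((xs.length : Int)) - (c - 1) > 0
      then (PySem.List.slice (PySem.List.sorted xs (fun x => x) false) none
              (some ((xs.length : Int) - (c - 1)))).sum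
      else 0)
    = xs.sum - (PySem.List.slice (PySem.List.sorted xs (fun x => x) true) none
        (some (min (c - 1) (((PySem.List.sorted xs (fun x => x) true).length : Int))))).sum := by
  rw [pv_sorted_desc_eq_reverse]
  have hlen : (PySem.List.sorted xs (fun x => x) false).length = xs.length :=
    PySem.List.length_sorted xs _ _
  have hsum : (PySem.List.sorted xs (fun x => x) false).sum = xs.sum :=
    (PySem.List.sorted_perm xs _ false).sum_eq
  simp only [List.length_reverse]
  have hk0 : 0 ≤ min (c - 1) (((PySem.List.sorted xs (fun x => x) false).length : Int)) := by
    rw [hlen]; omega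
  rw [PySem.List.slice_to _ hk0]
  rw [List.take_reverse, List.sum_reverse]
  by_cases hpos : ((xs.length : Int)) - (c - 1) > 0
  · rw [if_pos hpos, PySem.List.slice_to _ (by omega)]
    have h2 : (PySem.List.sorted xs (fun x => x) false).length
        - (min (c - 1) (((PySem.List.sorted xs (fun x => x) false).length : Int))).toNat
        = ((xs.length : Int) - (c - 1)).toNat := by
      rw [hlen]; omega
    rw [h2]
    have h3 := pv_sum_take_drop (PySem.List.sorted xs (fun x => x) false)
      (((xs.length : Int) - (c - 1)).toNat)
    have h4 : ((PySem.List.sorted xs (fun x => x) false).drop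
        (((xs.length : Int) - (c - 1)).toNat)).sum
        = ((PySem.List.sorted xs (fun x => x) false).take
            (((xs.length : Int) - (c - 1)).toNat)).sum
          + ((PySem.List.sorted xs (fun x => x) false).drop
            (((xs.length : Int) - (c - 1)).toNat)).sum
          - ((PySem.List.sorted xs (fun x => x) false).take
            (((xs.length : Int) - (c - 1)).toNat)).sum := by ring
    omega
  · rw [if_neg hpos]
    have h1 : (min (c - 1) (((PySem.List.sorted xs (fun x => x) false).length : Int))).toNat
        = (PySem.List.sorted xs (fun x => x) false).length := by
      rw [hlen]; omega
    rw [h1]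
    simp [hsum]

theorem pvMerge_perm (a : List Int) : ∀ b : List Int, (pvMerge a b).Perm (a ++ b) := by
  induction a with
  | nil => intro b; simp [pvMerge]
  | cons x xs ih =>
    intro b
    induction b with
    | nil => simp [pvMerge]
    | cons y ys ihb =>
      rw [pvMerge]
      split_ifs with h
      · exact (ih (y :: ys)).cons x
      · exact (ihb.cons y).trans List.perm_middle.symm

theorem pvMerge_pairwise (a : List Int) : ∀ b : List Int,
    a.Pairwise (· ≤ ·) → b.Pairwise (· ≤ ·) → (pvMerge a b).Pairwise (· ≤ ·) := by
  induction a with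
  | nil => intro b _ hb; simpa [pvMerge] using hb
  | cons x xs ih =>
    intro b
    induction b with
    | nil => intro ha _; simpa [pvMerge] using ha
    | cons y ys ihb =>
      intro ha hb
      have ha' := List.pairwise_cons.mp ha
      have hb' := List.pairwise_cons.mp hb
      rw [pvMerge]
      split_ifs with h
      · refine List.pairwise_cons.mpr ⟨?_, ih (y :: ys) ha'.2 hb⟩
        intro z hz
        have hz2 : z ∈ xs ++ y :: ys := (pvMerge_perm xs (y :: ys)).mem_iff.mp hz
        rcases List.mem_append.mp hz2 with h1 | h1
        · exact ha'.1 z h1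
        · rcases List.mem_cons.mp h1 with h2 | h2
          · exact h2 ▸ h
          · exact h.trans (hb'.1 z h2)
      · rw [not_le] at h
        refine List.pairwise_cons.mpr ⟨?_, ihb ha hb'.2⟩
        intro z hz
        have hz2 : z ∈ (x :: xs) ++ ys := (pvMerge_perm (x :: xs) ys).mem_iff.mp hz
        rcases List.mem_append.mp hz2 with h1 | h1
        · rcases List.mem_cons.mp h1 with h2 | h2
          · exact h2 ▸ h.le
          · exact h.le.trans (ha'.1 z h2)
        · exact hb'.1 z h1

-- dedup of (L repeated, then lengths all ≠ L) splits off L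
theorem pv_foldl_add_cons (a : Int) (ys : List Int) (hy : a ∉ ys) :
    ∀ s : List Int, ys.foldl PySem.Set.add (a :: s) = a :: ys.foldl PySem.Set.add s := by
  induction ys with
  | nil => intro s; rfl
  | cons y ys ih =>
    intro s
    have hya : y ≠ a := by intro h; exact hy (h ▸ List.mem_cons_self)
    have hy' : a ∉ ys := fun h => hy (List.mem_cons_of_mem _ h)
    simp only [List.foldl_cons]
    have : PySem.Set.add (a :: s) y = a :: PySem.Set.add s y := by
      simp [PySem.Set.add, PySem.Set.contains, hya]
      split <;> rfl
    rw [this, ih hy']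

theorem pv_dedup_group (L : Int) (g ys : List Int) (hg : ∀ x ∈ g, x = L) (hy : L ∉ ys) :
    PySem.List.dedup (L :: (g ++ ys)) = L :: PySem.List.dedup ys := by
  have hstep : ∀ g' : List Int, (∀ x ∈ g', x = L) →
      g'.foldl PySem.Set.add [L] = [L] := by
    intro g' h
    induction g' with
    | nil => rfl
    | cons z zs ihz =>
      have hz : z = L := h z List.mem_cons_self
      have : PySem.Set.add [L] z = [L] := by
        subst hz; simp [PySem.Set.add, PySem.Set.contains]
      simp only [List.foldl_cons, this]
      exact ihz (fun x hx => h x (List.mem_cons_of_mem _ hx))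
  show PySem.Set.ofList (L :: (g ++ ys)) = L :: PySem.Set.ofList ys
  rw [PySem.Set.ofList_eq_foldl, PySem.Set.ofList_eq_foldl]
  have h0 : PySem.Set.add ([] : List Int) L = [L] := by
    simp [PySem.Set.add, PySem.Set.contains]
  simp only [List.foldl_cons, h0, List.foldl_append]
  rw [hstep g hg]
  exact pv_foldl_add_cons L ys hy []

-- pvF depends only on the multiset of pairs
theorem pvF_perm {p1 p2 : List (Int × Int)} (hp : p1.Perm p2) (L : Int) :
    pvF p1 L = pvF p2 L := by
  have hasc : PySem.List.sorted ((p1.filter (fun p => decide (p.1 < L))).map (·.2)) (fun x => x) false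
      = PySem.List.sorted ((p2.filter (fun p => decide (p.1 < L))).map (·.2)) (fun x => x) false :=
    PySem.List.sorted_eq_sorted_of_perm _ _ _ (fun a b h => h) ((hp.filter _).map _)
  simp only [pvF, pv_sorted_desc_eq_reverse, hasc,
    ((hp.filter (fun p => decide (L < p.1))).map (·.2)).sum_eq, hp.countP_eq]

theorem pv_freq_getD (pairs : List (Int × Int)) (L : Int) :
    (pairs.foldl (fun fr p => fr.modify p.1 0 (· + 1))
      (PySem.Dict.empty : PySem.Dict Int Int)).getD L 0
    = ((pairs.countP (fun p => p.1 == L) : Int)) := by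
  have hfm : ∀ (ps : List (Int × Int)) (dct : PySem.Dict Int Int),
      ps.foldl (fun fr p => fr.modify p.1 0 (· + 1)) dct
      = (ps.map (·.1)).foldl (fun fr x => fr.modify x 0 (· + 1)) dct := by
    intro ps
    induction ps with
    | nil => intro dct; rfl
    | cons q qs ihq => intro dct; simp only [List.foldl_cons, List.map_cons, ihq]
  rw [hfm]
  rw [PySem.Dict.getD_foldl_modify_add_one, PySem.Dict.getD_empty]
  rw [List.count_eq_countP, List.countP_map]
  norm_num
  rfl

theorem pv_freq_keys (pairs : List (Int × Int)) :
    (pairs.foldl (fun fr p => fr.modify p.1 0 (· + 1))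
      (PySem.Dict.empty : PySem.Dict Int Int)).keys
    = PySem.List.dedup (pairs.map (·.1)) := by
  rw [PySem.Dict.keys_foldl_modify_key pairs (·.1) 0 (fun _ _ => (· + 1)) _]
  rw [PySem.Dict.keys_empty]
  rfl

-- A's result, as a fold of pvStep/pvF over the distinct lengths
theorem pv_A_eq (n : Int) (l d : List Int) :
    calculate_min_energy n l d
    = match (PySem.List.dedup ((l.zip d).map (·.1))).foldl
          (fun me L => pvStep me (pvF (l.zip d) L)) none with
      | some v => v
      | none => 0 := by
  simp only [calculate_min_energy]
  rw [pv_freq_keys]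
  simp only [pv_freq_getD]
  congr 1

-- one unfolding step of pvLoopB on a nonempty list
theorem pvLoopB_cons (total : Int) (p : Int × Int) (rest : List (Int × Int))
    (shorter : List Int) (pfx : Int) (best : Option Int) :
    pvLoopB total (p :: rest) shorter pfx best
    = pvLoopB total (rest.dropWhile (fun q => q.1 == p.1))
        (pvMerge shorter (PySem.List.sorted
          (p.2 :: (rest.takeWhile (fun q => q.1 == p.1)).map (·.2)) (fun x => x) false))
        (pfx + (p.2 :: (rest.takeWhile (fun q => q.1 == p.1)).map (·.2)).sum)
        (pvStep best ((total - pfx - (p.2 :: (rest.takeWhile (fun q => q.1 == p.1)).map (·.2)).sum)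
          + (if (shorter.length : Int)
                - (((p.2 :: (rest.takeWhile (fun q => q.1 == p.1)).map (·.2)).length : Int) - 1) > 0
             then (PySem.List.slice shorter none (some ((shorter.length : Int)
                - (((p.2 :: (rest.takeWhile (fun q => q.1 == p.1)).map (·.2)).length : Int) - 1)))).sum
             else 0))) := by
  rw [pvLoopB.eq_def]
  exact congrArg (pvLoopB _ _ _ _) (pvStep_eq_match best _)

-- the main loop invariant of B
theorem pvLoopB_eq (full : List (Int × Int)) (N : Nat) :
    ∀ (cur done : List (Int × Int)) (best : Option Int),
      cur.length ≤ N →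
      full = done ++ cur →
      (∀ p ∈ done, ∀ q ∈ cur, p.1 < q.1) →
      cur.Pairwise (fun a b => a.1 ≤ b.1) →
      pvLoopB ((full.map (·.2)).sum) cur
        (PySem.List.sorted (done.map (·.2)) (fun x => x) false)
        ((done.map (·.2)).sum) best
      = (PySem.List.dedup (cur.map (·.1))).foldl
          (fun me L => pvStep me (pvF full L)) best := by
  induction N with
  | zero =>
    intro cur done best hlen _ _ _
    have hc : cur = [] := List.eq_nil_of_length_eq_zero (Nat.le_zero.mp hlen)
    subst hc
    rw [pvLoopB]
    rfl
  | succ N ih =>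
    intro cur done best hlen hfull hlt hsort
    cases cur with
    | nil => rw [pvLoopB]; rfl
    | cons p rest =>
      rw [pvLoopB_cons]
      set tw := rest.takeWhile (fun q => q.1 == p.1) with htw
      set rest' := rest.dropWhile (fun q => q.1 == p.1) with hrest'
      have hsplit : tw ++ rest' = rest := by
        rw [htw, hrest']; exact List.takeWhile_append_dropWhile
      have htwL : ∀ q ∈ tw, q.1 = p.1 := by
        intro q hq; rw [htw] at hq
        simpa using List.mem_takeWhile_imp hq
      have hpw := List.pairwise_cons.mp hsort
      have hr'sub : rest'.Sublist rest := by
        rw [hrest']; exact List.dropWhile_sublist _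
      have hr'pw : rest'.Pairwise (fun a b => a.1 ≤ b.1) := hpw.2.sublist hr'sub
      have hgt : ∀ q ∈ rest', p.1 < q.1 := by
        cases hre : rest' with
        | nil => intro q hq; cases hq
        | cons r rs =>
          intro q hq
          have h5 := List.head?_dropWhile_not (fun q => q.1 == p.1) rest
          rw [← hrest', hre] at h5
          have hrne : r.1 ≠ p.1 := by simpa using h5
          have hrle : p.1 ≤ r.1 := hpw.1 r (hr'sub.mem (hre ▸ List.mem_cons_self))
          have hrlt : p.1 < r.1 := lt_of_le_of_ne hrle (Ne.symm hrne)
          rcases List.mem_cons.mp hq with rfl | hq2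
          · exact hrlt
          · rw [hre] at hr'pw
            exact hrlt.trans_le ((List.pairwise_cons.mp hr'pw).1 q hq2)
      have hcurdec : p :: rest = (p :: tw) ++ rest' := by rw [← hsplit]; rfl
      have hfull' : full = (done ++ (p :: tw)) ++ rest' := by
        rw [hfull, hcurdec, ← List.append_assoc]
      have hdlt : ∀ x ∈ done, x.1 < p.1 := fun x hx => hlt x hx p List.mem_cons_self
      -- filters and count over full, at candidate length p.1
      have hfGT : full.filter (fun q => decide (p.1 < q.1)) = rest' := by
        rw [hfull', List.filter_append, List.filter_append]
        have h1 : done.filter (fun q => decide (p.1 < q.1)) = [] :=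
          List.filter_eq_nil_iff.mpr (fun x hx => by simpa using not_lt.mpr (hdlt x hx).le)
        have h2 : (p :: tw).filter (fun q => decide (p.1 < q.1)) = [] := by
          refine List.filter_eq_nil_iff.mpr (fun x hx => ?_)
          rcases List.mem_cons.mp hx with rfl | hx2
          · simp
          · simpa [htwL x hx2] using not_lt.mpr (le_of_eq (htwL x hx2).symm)
        have h3 : rest'.filter (fun q => decide (p.1 < q.1)) = rest' :=
          List.filter_eq_self.mpr (fun x hx => by simpa using hgt x hx)
        rw [h1, h2, h3]; rfl
      have hfLT : full.filter (fun q => decide (q.1 < p.1)) = done := by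
        rw [hfull', List.filter_append, List.filter_append]
        have h1 : done.filter (fun q => decide (q.1 < p.1)) = done :=
          List.filter_eq_self.mpr (fun x hx => by simpa using hdlt x hx)
        have h2 : (p :: tw).filter (fun q => decide (q.1 < p.1)) = [] := by
          refine List.filter_eq_nil_iff.mpr (fun x hx => ?_)
          rcases List.mem_cons.mp hx with rfl | hx2
          · simp
          · simpa [htwL x hx2] using not_lt.mpr (le_of_eq (htwL x hx2))
        have h3 : rest'.filter (fun q => decide (q.1 < p.1)) = [] :=
          List.filter_eq_nil_iff.mpr (fun x hx => by simpa using not_lt.mpr (hgt x hx).le)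
        rw [h1, h2, h3, List.append_nil, List.append_nil]
      have hcnt : full.countP (fun q => q.1 == p.1) = (p.2 :: tw.map (·.2)).length := by
        rw [hfull', List.countP_append, List.countP_append]
        have h1 : done.countP (fun q => q.1 == p.1) = 0 :=
          List.countP_eq_zero.mpr (fun x hx => by simpa using (hdlt x hx).ne)
        have h2 : (p :: tw).countP (fun q => q.1 == p.1) = (p :: tw).length := by
          refine List.countP_eq_length.mpr (fun x hx => ?_)
          rcases List.mem_cons.mp hx with rfl | hx2
          · simp
          · simpa using htwL x hx2
        have h3 : rest'.countP (fun q => q.1 == p.1) = 0 :=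
          List.countP_eq_zero.mpr (fun x hx => by simpa using (hgt x hx).ne')
        rw [h1, h2, h3]
        simp
      -- the merged shorter list is the sorted costs of the new done
      have hmerge : pvMerge (PySem.List.sorted (done.map (·.2)) (fun x => x) false)
          (PySem.List.sorted (p.2 :: tw.map (·.2)) (fun x => x) false)
          = PySem.List.sorted (((done ++ (p :: tw)).map (·.2))) (fun x => x) false := by
        symm
        apply PySem.List.sorted_id_eq_of_perm_of_pairwise
        · refine (pvMerge_perm _ _).trans ?_
          have hmap : (done ++ (p :: tw)).map (·.2) = done.map (·.2) ++ (p.2 :: tw.map (·.2)) := by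
            simp
          rw [hmap]
          exact (PySem.List.sorted_perm _ _ _).append (PySem.List.sorted_perm _ _ _)
        · exact pvMerge_pairwise _ _ (PySem.List.sorted_pairwise _ _) (PySem.List.sorted_pairwise _ _)
      have hsum2 : (done.map (·.2)).sum + (p.2 :: tw.map (·.2)).sum
          = ((done ++ (p :: tw)).map (·.2)).sum := by simp
      -- distinct lengths of the current segment
      have hmapfst : (p :: rest).map (·.1) = p.1 :: (tw.map (·.1) ++ rest'.map (·.1)) := by
        rw [← hsplit]; simp
      rw [hmapfst, pv_dedup_group p.1 (tw.map (·.1)) (rest'.map (·.1))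
        (by intro x hx; rcases List.mem_map.mp hx with ⟨q, hq, rfl⟩; exact htwL q hq)
        (by intro hx; rcases List.mem_map.mp hx with ⟨q, hq, h⟩; exact (hgt q hq).ne' h),
        List.foldl_cons]
      -- apply the induction hypothesis for the tail
      have hlen' : rest'.length ≤ N := by
        have := hr'sub.length_le
        simp only [List.length_cons] at hlen
        omega
      have hlt' : ∀ x ∈ done ++ (p :: tw), ∀ q ∈ rest', x.1 < q.1 := by
        intro x hx q hq
        rcases List.mem_append.mp hx with h1 | h1
        · exact hlt x h1 q (List.mem_cons_of_mem p (hr'sub.mem hq))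
        · have hx1 : x.1 = p.1 := by
            rcases List.mem_cons.mp h1 with rfl | h2
            · rfl
            · exact htwL x h2
          rw [hx1]; exact hgt q hq
      have hih := ih rest' (done ++ (p :: tw)) (pvStep best (pvF full p.1))
        hlen' hfull' hlt' hr'pw
      rw [hmerge, hsum2]
      convert hih using 3
      -- remaining: B's group value equals pvF full p.1
      have hsumfull : (full.map (·.2)).sum
          = (done.map (·.2)).sum + (p.2 :: tw.map (·.2)).sum + (rest'.map (·.2)).sum := by
        rw [hfull']
        simp [List.sum_append]
        ring
      have hc1 : (1 : Int) ≤ ((p.2 :: tw.map (·.2)).length : Int) := by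
        simp only [List.length_cons]
        omega
      have hrm := pv_rm_eq (done.map (·.2)) ((p.2 :: tw.map (·.2)).length : Int) hc1
      simp only [PySem.List.length_sorted] at hrm ⊢
      simp only [pvF]
      rw [hfGT, hfLT, hcnt]
      simp only [PySem.List.length_sorted]
      rw [hrm]
      have hS : (PySem.List.sorted (done.map (·.2)) (fun x => x) true).sum
          = (done.map (·.2)).sum := (PySem.List.sorted_perm _ _ _).sum_eq
      rw [hS, hsumfull]
      ring

theorem pv_B_eq (n : Int) (l d : List Int) :
    calculate_min_energy_alt n l d
    = match (PySem.List.dedup ((PySem.List.sorted (l.zip d) (fun p => p.1) false).map (·.1))).foldl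
          (fun me L => pvStep me (pvF (PySem.List.sorted (l.zip d) (fun p => p.1) false) L)) none with
      | some v => v
      | none => 0 := by
  simp only [calculate_min_energy_alt]
  have h0 : PySem.List.sorted (([] : List (Int × Int)).map (·.2)) (fun x : Int => x) false
      = [] := rfl
  have h := pvLoopB_eq (PySem.List.sorted (l.zip d) (fun p => p.1) false)
      (PySem.List.sorted (l.zip d) (fun p => p.1) false).length
      (PySem.List.sorted (l.zip d) (fun p => p.1) false) [] none le_rfl (by simp)
      (by intro p hp q hq; cases hp) (PySem.List.sorted_pairwise _ _)
  rw [h0] at h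
  simp only [List.map_nil, List.sum_nil] at h
  rw [h]

-- ===== VERDICT (by name: the statement is the Claim_ definition above) =====
theorem calculate_min_energy_spec : Claim_equal_calculate_min_energy := by
  intro n l d _hdom _hpre
  unfold Spec_calculate_min_energy
  rw [pv_A_eq, pv_B_eq]
  have hsp : (PySem.List.sorted (l.zip d) (fun p => p.1) false).Perm (l.zip d) :=
    PySem.List.sorted_perm _ _ _
  have hF : ∀ L, pvF (l.zip d) L = pvF (PySem.List.sorted (l.zip d) (fun p => p.1) false) L :=
    fun L => pvF_perm hsp.symm L
  have hK : (PySem.List.dedup ((l.zip d).map (·.1))).Perm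
      (PySem.List.dedup ((PySem.List.sorted (l.zip d) (fun p => p.1) false).map (·.1))) := by
    refine (List.perm_ext_iff_of_nodup (PySem.List.nodup_dedup _) (PySem.List.nodup_dedup _)).mpr ?_
    intro a
    rw [PySem.List.mem_dedup, PySem.List.mem_dedup]
    exact ⟨fun h => (hsp.map (·.1)).symm.mem_iff.mp h, fun h => (hsp.map (·.1)).mem_iff.mp h⟩
  simp only [funext hF]
  rw [foldl_pvStep_perm _ hK]
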